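-- pv_equiv track=rewrite | github.com/juliocnicolao/quad-portal | app/pages/5_Fundamentos.py | _quartile_css
-- ===== SOURCE A (Python) =====
-- import math
--
-- def _valid(v):
--     return v is not None and not (isinstance(v, float) and math.isnan(v))
--
-- def _quartile_css(val, col_vals, lo_good=True):
--     """Return pill CSS class based on quartile position."""
--     if not _valid(val):
--         return "pill-na"
--     clean = sorted(v for v in col_vals if _valid(v))
--     if len(clean) < 4:
--         return "pill-mid"
--     q25 = clean[len(clean) // 4]
--     q75 = clean[int(len(clean) * 0.75)]
--     if lo_good:
--         return "pill-hi" if val >= q75 else ("pill-lo" if val <= q25 else "pill-mid")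
--     else:
--         return "pill-hi" if val <= q25 else ("pill-lo" if val >= q75 else "pill-mid")
-- ===== SOURCE B (Python) =====
-- import math
--
-- def _valid(v):
--     return v is not None and not (isinstance(v, float) and math.isnan(v))
--
-- def _select(xs, k):
--     """k-th smallest element of xs (0-based) by three-way quickselect, no sorting."""
--     while True:
--         p = xs[len(xs) // 2]
--         lt = [x for x in xs if x < p]
--         if k < len(lt):
--             xs = lt
--             continue
--         eq = sum(1 for x in xs if x == p)
--         if k < len(lt) + eq:
--             return p
--         k = k - len(lt) - eq
--         xs = [x for x in xs if x > p]
--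
-- def _quartile_css(val, col_vals, lo_good=True):
--     """Return pill CSS class based on quartile position."""
--     if not _valid(val):
--         return "pill-na"
--     clean = [v for v in col_vals if _valid(v)]
--     n = len(clean)
--     if n < 4:
--         return "pill-mid"
--     q25 = _select(clean, n // 4)
--     q75 = _select(clean, 3 * n // 4)
--     if lo_good:
--         return "pill-hi" if val >= q75 else ("pill-lo" if val <= q25 else "pill-mid")
--     else:
--         return "pill-hi" if val <= q25 else ("pill-lo" if val >= q75 else "pill-mid")
-- ===== Notes on version B (the rewrite author's own statement) =====
-- stated objective: alternative
-- what changed: B never sorts: it extracts the two needed order statistics (indices n//4 and 3n//4) directly with a three-way quickselect partition loop.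
import Mathlib
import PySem

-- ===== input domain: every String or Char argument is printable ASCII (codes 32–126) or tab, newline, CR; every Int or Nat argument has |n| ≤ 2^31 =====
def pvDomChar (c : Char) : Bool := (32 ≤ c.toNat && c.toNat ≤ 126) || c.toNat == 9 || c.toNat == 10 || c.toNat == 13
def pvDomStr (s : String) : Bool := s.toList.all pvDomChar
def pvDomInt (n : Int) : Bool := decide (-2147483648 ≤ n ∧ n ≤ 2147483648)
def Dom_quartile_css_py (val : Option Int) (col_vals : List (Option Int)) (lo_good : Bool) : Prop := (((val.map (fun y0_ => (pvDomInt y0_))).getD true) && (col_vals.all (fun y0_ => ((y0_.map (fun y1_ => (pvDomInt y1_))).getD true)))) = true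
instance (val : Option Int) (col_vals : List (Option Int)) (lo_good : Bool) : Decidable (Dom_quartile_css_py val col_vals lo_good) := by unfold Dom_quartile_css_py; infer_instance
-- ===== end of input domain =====

-- B replaces A's full sort by a three-way quickselect loop for the two needed order
-- statistics (objective: alternative algorithm; not measurably faster in Python).

-- ===== PORT A =====
-- On the Option Int domain, Python's `_valid(v)` is exactly `v is not None` (no floats/NaN).
-- The indices len//4 and int(len*0.75) are nonnegative and < len (len ≥ 4), so plain
-- List.getD is exact; int(len(clean)*0.75) equals 3*len//4 exactly for every reachable
-- list length (0.75 is a dyadic float and 3*len < 2^53).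
def quartile_css_py (val : Option Int) (col_vals : List (Option Int)) (lo_good : Bool) : String :=
  match val with
  | none => "pill-na"
  | some v =>
    let clean := PySem.List.sorted (col_vals.filterMap id) (fun x => x) false
    if clean.length < 4 then "pill-mid"
    else
      let q25 := clean.getD (clean.length / 4) 0
      let q75 := clean.getD (3 * clean.length / 4) 0
      if lo_good then
        if v ≥ q75 then "pill-hi" else if v ≤ q25 then "pill-lo" else "pill-mid"
      else
        if v ≤ q25 then "pill-hi" else if v ≥ q75 then "pill-lo" else "pill-mid"

-- ===== PORT B =====
-- Transliteration of Source B's `_select`: the while loop becomes tail recursion on the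
-- same state (xs, k); pivot p = xs[len(xs)//2] (in range on a nonempty list, so getD is exact).
def pvPivot (xs : List Int) : Int := xs.getD (xs.length / 2) 0

theorem pvPivot_mem (x : Int) (rest : List Int) : pvPivot (x :: rest) ∈ x :: rest := by
  unfold pvPivot
  rw [List.getD_eq_getElem _ _ (by simp; omega)]
  exact List.getElem_mem _

def pvSelect : List Int → Nat → Int
  | [], _ => 0   -- unreachable for the in-range indices B uses (xs[...] would raise on [])
  | x :: rest, k =>
    if k < ((x :: rest).filter (fun y => decide (y < pvPivot (x :: rest)))).length then
      pvSelect ((x :: rest).filter (fun y => decide (y < pvPivot (x :: rest)))) k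
    else if k < ((x :: rest).filter (fun y => decide (y < pvPivot (x :: rest)))).length +
        ((x :: rest).filter (fun y => decide (y = pvPivot (x :: rest)))).length then
      pvPivot (x :: rest)
    else
      pvSelect ((x :: rest).filter (fun y => decide (pvPivot (x :: rest) < y)))
        (k - ((x :: rest).filter (fun y => decide (y < pvPivot (x :: rest)))).length -
          ((x :: rest).filter (fun y => decide (y = pvPivot (x :: rest)))).length)
termination_by xs _ => xs.length
decreasing_by
  · exact List.length_filter_lt_length_iff_exists.2 ⟨_, pvPivot_mem x rest, by simp⟩
  · exact List.length_filter_lt_length_iff_exists.2 ⟨_, pvPivot_mem x rest, by simp⟩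

def quartile_css_py_alt (val : Option Int) (col_vals : List (Option Int)) (lo_good : Bool) : String :=
  match val with
  | none => "pill-na"
  | some v =>
    let clean := col_vals.filterMap id
    let n := clean.length
    if n < 4 then "pill-mid"
    else
      let q25 := pvSelect clean (n / 4)
      let q75 := pvSelect clean (3 * n / 4)
      if lo_good then
        if v ≥ q75 then "pill-hi" else if v ≤ q25 then "pill-lo" else "pill-mid"
      else
        if v ≤ q25 then "pill-hi" else if v ≥ q75 then "pill-lo" else "pill-mid"

-- ===== PRECONDITION & SPEC =====
def Spec_quartile_css_py (val : Option Int) (col_vals : List (Option Int)) (lo_good : Bool) (out : String) : Prop := out = quartile_css_py_alt val col_vals lo_good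
instance (val : Option Int) (col_vals : List (Option Int)) (lo_good : Bool) (out : String) : Decidable (Spec_quartile_css_py val col_vals lo_good out) := by unfold Spec_quartile_css_py; infer_instance

-- ===== CLAIM (what is proved, stated in full; the proofs are below) =====
def Claim_equal_quartile_css_py : Prop := ∀ (val : Option Int) (col_vals : List (Option Int)) (lo_good : Bool), Dom_quartile_css_py val col_vals lo_good → Spec_quartile_css_py val col_vals lo_good (quartile_css_py val col_vals lo_good)

-- ===== LEMMAS AND PROOFS =====

-- three-way partition by the pivot is a permutation of the list
theorem pvPartition_perm (p : Int) (xs : List Int) :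
    (xs.filter (fun x => decide (x < p)) ++ xs.filter (fun x => decide (x = p)) ++
      xs.filter (fun x => decide (p < x))).Perm xs := by
  induction xs with
  | nil => simp
  | cons x xs ih =>
    simp only [List.filter_cons]
    rcases lt_trichotomy x p with h | h | h
    · rw [if_pos (by simpa using h), if_neg (by simp; omega), if_neg (by simp; omega)]
      exact ih.cons x
    · rw [if_neg (by simp; omega), if_pos (by simpa using h), if_neg (by simp; omega)]
      exact ((List.perm_middle).append_right _).trans (ih.cons x)
    · rw [if_neg (by simp; omega), if_neg (by simp; omega), if_pos (by simpa using h)]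
      exact (List.perm_middle).trans (ih.cons x)

-- getD of a list whose elements are all `p`
theorem pvGetD_all_eq (p : Int) (l : List Int) (j : Nat) (hj : j < l.length)
    (h : ∀ x ∈ l, x = p) : l.getD j 0 = p := by
  rw [List.getD_eq_getElem l 0 hj]
  exact h _ (List.getElem_mem hj)

-- sorted list decomposes around the pivot
theorem pvSorted_decomp (p : Int) (xs : List Int) :
    PySem.List.sorted xs (fun x => x) false =
      PySem.List.sorted (xs.filter (fun x => decide (x < p))) (fun x => x) false ++
      xs.filter (fun x => decide (x = p)) ++
      PySem.List.sorted (xs.filter (fun x => decide (p < x))) (fun x => x) false := by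
  apply PySem.List.sorted_id_eq_of_perm_of_pairwise
  · exact (((PySem.List.sorted_perm _ _ _).append (List.Perm.refl _)).append
      (PySem.List.sorted_perm _ _ _)).trans (pvPartition_perm p xs)
  · have hA := PySem.List.sorted_pairwise (xs.filter (fun x => decide (x < p))) (fun x => x)
    have hC := PySem.List.sorted_pairwise (xs.filter (fun x => decide (p < x))) (fun x => x)
    have memA : ∀ a ∈ PySem.List.sorted (xs.filter (fun x => decide (x < p))) (fun x => x) false,
        a < p := by
      intro a ha
      have := (PySem.List.mem_sorted _ _ _ _).1 ha
      simpa using (List.mem_filter.1 this).2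
    have memB : ∀ b ∈ xs.filter (fun x => decide (x = p)), b = p := by
      intro b hb; simpa using (List.mem_filter.1 hb).2
    have memC : ∀ c ∈ PySem.List.sorted (xs.filter (fun x => decide (p < x))) (fun x => x) false,
        p < c := by
      intro c hc
      have := (PySem.List.mem_sorted _ _ _ _).1 hc
      simpa using (List.mem_filter.1 this).2
    rw [List.append_assoc, List.pairwise_append]
    refine ⟨hA, ?_, ?_⟩
    · rw [List.pairwise_append]
      refine ⟨List.pairwise_of_forall_mem_list (fun a ha b hb => ?_), hC, fun a ha b hb => ?_⟩
      · rw [memB a ha, memB b hb]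
      · rw [memB a ha]; exact le_of_lt (memC b hb)
    · intro a ha b hb
      rcases List.mem_append.1 hb with hb | hb
      · rw [memB b hb]; exact le_of_lt (memA a ha)
      · exact le_of_lt ((memA a ha).trans (memC b hb))

-- quickselect returns the k-th element of the sorted list
theorem pvSelect_sorted (xs : List Int) (k : Nat) (hk : k < xs.length) :
    pvSelect xs k = (PySem.List.sorted xs (fun x => x) false).getD k 0 := by
  induction hn : xs.length using Nat.strong_induction_on generalizing xs k with
  | _ n ih =>
  subst hn
  match xs with
  | [] => simp at hk
  | x :: rest =>
    rw [pvSelect]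
    set p := pvPivot (x :: rest) with hpdef
    have hAlt : ((x :: rest).filter (fun y => decide (y < p))).length < (x :: rest).length :=
      List.length_filter_lt_length_iff_exists.2 ⟨p, pvPivot_mem x rest, by simp⟩
    have hClt : ((x :: rest).filter (fun y => decide (p < y))).length < (x :: rest).length :=
      List.length_filter_lt_length_iff_exists.2 ⟨p, pvPivot_mem x rest, by simp⟩
    have hperm := pvPartition_perm p (x :: rest)
    have hlens := hperm.length_eq
    simp only [List.length_append] at hlens
    have hdec := pvSorted_decomp p (x :: rest)
    have hA := PySem.List.length_sorted ((x :: rest).filter (fun y => decide (y < p)))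
      (fun x => x) false
    have hC := PySem.List.length_sorted ((x :: rest).filter (fun y => decide (p < y)))
      (fun x => x) false
    rw [hdec]
    split_ifs with h1 h2
    · rw [ih _ hAlt _ _ h1 rfl, List.append_assoc,
        List.getD_append _ _ _ _ (by omega)]
    · rw [List.getD_append _ _ _ _ (by rw [List.length_append]; omega),
        List.getD_append_right _ _ _ _ (by omega)]
      exact (pvGetD_all_eq p _ _ (by omega)
        (fun x hx => by simpa using (List.mem_filter.1 hx).2)).symm
    · rw [List.getD_append_right _ _ _ _ (by rw [List.length_append]; omega),
        List.length_append,
        ih _ hClt _ _ (by omega) rfl]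
      congr 1
      omega

-- ===== VERDICT (by name: the statement is the Claim_ definition above) =====
theorem quartile_css_py_spec : Claim_equal_quartile_css_py := by
  intro val col_vals lo_good _
  unfold Spec_quartile_css_py quartile_css_py quartile_css_py_alt
  cases val with
  | none => rfl
  | some v =>
    simp only []
    have hlen : (PySem.List.sorted (col_vals.filterMap id) (fun x => x) false).length
        = (col_vals.filterMap id).length := PySem.List.length_sorted _ _ _
    set clean := col_vals.filterMap id with hcl
    by_cases h4 : clean.length < 4
    · simp [hlen, h4]
    · have hn : 0 < clean.length := by omega
      have h25 : clean.length / 4 < clean.length := by omega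
      have h75 : 3 * clean.length / 4 < clean.length := by omega
      rw [hlen]
      simp only [h4]
      rw [← pvSelect_sorted clean _ h25, ← pvSelect_sorted clean _ h75]
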